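-- pv_equiv track=rewrite | github.com/frankeee/ExactasPrograma | incendiosimulacion.py | propagacion
-- ===== SOURCE A (Python) =====
-- def propagacion(bosque):
--     for i in range(len(bosque)-1):
--         if bosque[i] == -1 and bosque[i+1] == 1:
--             bosque[i+1] = -1
--     n = len(bosque)-1
--     while n > 0:
--         if bosque[n] == -1 and bosque[n-1] == 1:
--             bosque[n-1] = -1
--         n -= 1
--     return bosque
-- ===== SOURCE B (Python) =====
-- def propagacion(bosque):
--     n = len(bosque)
--     i = 0
--     while i < n:
--         if bosque[i] == 1:
--             j = i
--             while j < n and bosque[j] == 1: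
--                 j += 1
--             burn = (i > 0 and bosque[i - 1] == -1) or (j < n and bosque[j] == -1)
--             if burn:
--                 for k in range(i, j):
--                     bosque[k] = -1
--             i = j
--         else:
--             i += 1
--     return bosque
-- ===== Notes on version B (the rewrite author's own statement) =====
-- stated objective: alternative
-- what changed: A makes a full left-to-right pass then a full right-to-left pass spreading -1 cell by cell; B scans once for maximal runs of consecutive 1s and burns a whole run iff a cell adjacent to the run is -1.
import Mathlib
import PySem

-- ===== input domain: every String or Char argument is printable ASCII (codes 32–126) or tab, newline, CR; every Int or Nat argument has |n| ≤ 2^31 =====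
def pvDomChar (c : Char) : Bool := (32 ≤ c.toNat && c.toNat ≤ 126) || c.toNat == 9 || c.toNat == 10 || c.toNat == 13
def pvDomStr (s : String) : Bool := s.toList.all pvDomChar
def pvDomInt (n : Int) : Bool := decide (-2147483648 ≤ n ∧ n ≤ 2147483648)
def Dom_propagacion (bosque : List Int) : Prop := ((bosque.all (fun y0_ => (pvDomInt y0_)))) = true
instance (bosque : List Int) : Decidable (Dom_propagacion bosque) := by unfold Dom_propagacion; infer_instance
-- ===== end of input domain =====

-- B replaces A's two directional sweeps by a single scan over maximal runs of 1s;
-- both Pythons mutate `bosque` in place and return the same object — the equivalence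
-- proved here is about the returned value.

-- ===== PORT A =====
-- one step of the for-loop: if bosque[i] == -1 and bosque[i+1] == 1: bosque[i+1] = -1
-- (indices produced by the loops are always in range, so getD's default is never read)
def fwdStep (l : List Int) (i : Nat) : List Int :=
  if l.getD i 0 = -1 ∧ l.getD (i + 1) 0 = 1 then l.set (i + 1) (-1) else l

-- the while-loop, n counting down to 0
def bwdLoop (l : List Int) (n : Nat) : List Int :=
  match n with
  | 0 => l
  | m + 1 =>
      bwdLoop (if l.getD (m + 1) 0 = -1 ∧ l.getD m 0 = 1 then l.set m (-1) else l) m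

def propagacion (bosque : List Int) : List Int :=
  let l1 := (List.range (bosque.length - 1)).foldl fwdStep bosque
  bwdLoop l1 (l1.length - 1)

-- ===== PORT B =====
-- scan for maximal runs of consecutive 1s; `prev` is the element just left of `l`
-- (0 at the start, standing for Python's `i > 0` guard); burn a run iff a neighbour is -1.
def goB (prev : Int) (l : List Int) : List Int :=
  match l with
  | [] => []
  | x :: xs =>
      if x = 1 then
        let run := (x :: xs).takeWhile (fun y => y = 1)
        let rest := (x :: xs).dropWhile (fun y => y = 1)
        let burn := prev = -1 ∨ rest.headD 0 = -1
        (if burn then run.map (fun _ => (-1 : Int)) else run) ++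
          goB (if burn then -1 else 1) rest
      else
        x :: goB x xs
termination_by l.length
decreasing_by
  · simp only [List.dropWhile_cons, if_pos (by simp [*] : (fun y => decide (y = 1)) x = true)]
    exact Nat.lt_succ_of_le (List.length_dropWhile_le _ _)
  · simp

def propagacion_alt (bosque : List Int) : List Int := goB 0 bosque

-- ===== PRECONDITION & SPEC =====
def Spec_propagacion (bosque : List Int) (out : List Int) : Prop := out = propagacion_alt bosque
instance (bosque : List Int) (out : List Int) : Decidable (Spec_propagacion bosque out) := by unfold Spec_propagacion; infer_instance

-- ===== CLAIM (what is proved, stated in full; the proofs are below) =====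
def Claim_equal_propagacion : Prop := ∀ (bosque : List Int), Dom_propagacion bosque → Spec_propagacion bosque (propagacion bosque)

-- ===== LEMMAS AND PROOFS =====

-- structural description of A's forward pass: prev is the (already updated) left neighbour
def Fgo (prev : Int) (l : List Int) : List Int :=
  match l with
  | [] => []
  | x :: xs =>
      let x' := if prev = -1 ∧ x = 1 then -1 else x
      x' :: Fgo x' xs

-- structural description of A's backward pass: process the tail first, then the head
def Bgo (l : List Int) : List Int :=
  match l with
  | [] => []
  | x :: xs =>
      let t := Bgo xs
      (if t.headD 0 = -1 ∧ x = 1 then -1 else x) :: t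

theorem fwdStep_cons (x : Int) (l : List Int) (i : Nat) :
    fwdStep (x :: l) (i + 1) = x :: fwdStep l i := by
  simp [fwdStep]
  split_ifs <;> simp

theorem foldl_fwdStep_map_succ (is : List Nat) (x : Int) (l : List Int) :
    (is.map Nat.succ).foldl fwdStep (x :: l) = x :: is.foldl fwdStep l := by
  induction is generalizing l with
  | nil => rfl
  | cons i is ih => simp [List.foldl_cons, fwdStep_cons, ih]

theorem fwd_eq_Fgo (l : List Int) (x : Int) :
    (List.range ((x :: l).length - 1)).foldl fwdStep (x :: l) = x :: Fgo x l := by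
  induction l generalizing x with
  | nil => rfl
  | cons y ys ih =>
      have hr : List.range ((x :: y :: ys).length - 1)
          = 0 :: (List.range (ys.length + 1 - 1)).map Nat.succ := by
        simp [List.range_succ_eq_map]
      rw [hr, List.foldl_cons]
      have h0 : fwdStep (x :: y :: ys) 0
          = x :: (if x = -1 ∧ y = 1 then -1 else y) :: ys := by
        simp [fwdStep]
        split_ifs <;> simp
      rw [h0, foldl_fwdStep_map_succ]
      have := ih (x := (if x = -1 ∧ y = 1 then -1 else y))
      simp only [List.length_cons] at this ⊢
      rw [this]
      simp [Fgo]

theorem fwdAll_eq_Fgo (l : List Int) :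
    (List.range (l.length - 1)).foldl fwdStep l = Fgo 0 l := by
  cases l with
  | nil => rfl
  | cons x xs =>
      rw [fwd_eq_Fgo]
      simp [Fgo]

theorem bwdLoop_cons (x : Int) (l : List Int) (m : Nat) :
    bwdLoop (x :: l) (m + 1)
      = (if (bwdLoop l m).headD 0 = -1 ∧ x = 1 then -1 else x) :: bwdLoop l m := by
  induction m generalizing l with
  | zero =>
      simp [bwdLoop]
      split_ifs with h h2 h3
      · cases l with
        | nil => simp_all
        | cons a t => simp_all
      · exfalso; apply h2; cases l with
        | nil => simp_all
        | cons a t => simp_all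
      · exfalso; apply h; cases l with
        | nil => simp_all
        | cons a t => simp_all
      · rfl
  | succ m ih =>
      show bwdLoop (if (x :: l).getD (m + 2) 0 = -1 ∧ (x :: l).getD (m + 1) 0 = 1
            then (x :: l).set (m + 1) (-1) else (x :: l)) (m + 1) = _
      have hstep : (if (x :: l).getD (m + 2) 0 = -1 ∧ (x :: l).getD (m + 1) 0 = 1
            then (x :: l).set (m + 1) (-1) else (x :: l))
          = x :: (if l.getD (m + 1) 0 = -1 ∧ l.getD m 0 = 1 then l.set m (-1) else l) := by
        split_ifs with h h2 h3 <;> simp_all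
      rw [hstep, ih]
      rfl

theorem bwd_eq_Bgo (l : List Int) : bwdLoop l (l.length - 1) = Bgo l := by
  induction l with
  | nil => rfl
  | cons x xs ih =>
      cases xs with
      | nil => rfl
      | cons y ys =>
          have : (x :: y :: ys).length - 1 = (y :: ys).length - 1 + 1 := by simp
          rw [this, bwdLoop_cons, ih]
          rfl

-- prev is only inspected through `= -1`; when the head is not 1 it is irrelevant
theorem Fgo_prev_irrel (l : List Int) (a b : Int) (h : l.headD 0 ≠ 1 ∨ l = []) :
    Fgo a l = Fgo b l := by
  cases l with
  | nil => rfl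
  | cons x xs =>
      have hx : x ≠ 1 := by
        cases h with
        | inl h => simpa using h
        | inr h => simp at h
      simp [Fgo, hx]

theorem goB_prev_irrel (l : List Int) (a b : Int) (h : l.headD 0 ≠ 1 ∨ l = []) :
    goB a l = goB b l := by
  cases l with
  | nil => rw [goB, goB]
  | cons x xs =>
      have hx : x ≠ 1 := by
        cases h with
        | inl h => simpa using h
        | inr h => simp at h
      rw [goB, goB]
      simp [hx]

theorem Fgo_burn_run (k : Nat) (rest : List Int) :
    Fgo (-1) (List.replicate k 1 ++ rest)
      = List.replicate k (-1) ++ Fgo (-1) rest := by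
  induction k with
  | zero => rfl
  | succ k ih => simp [List.replicate_succ, Fgo, ih]

theorem Fgo_keep_run (k : Nat) (rest : List Int) (p : Int) (hp : p ≠ -1) :
    Fgo p (List.replicate k 1 ++ rest)
      = List.replicate k 1 ++ Fgo (if k = 0 then p else 1) rest := by
  induction k generalizing p with
  | zero => simp
  | succ k ih =>
      simp only [List.replicate_succ, List.cons_append, Fgo, hp, false_and, if_false]
      rw [ih 1 (by norm_num)]
      cases k <;> simp

theorem Bgo_head_ne_one (x : Int) (xs : List Int) (hx : x ≠ 1) :
    Bgo (x :: xs) = x :: Bgo xs := by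
  simp [Bgo, hx]

theorem Bgo_burn_run (k : Nat) (t : List Int) (ht : (Bgo t).headD 0 = -1) :
    Bgo (List.replicate k 1 ++ t) = List.replicate k (-1) ++ Bgo t := by
  induction k with
  | zero => rfl
  | succ k ih =>
      rw [List.replicate_succ, List.cons_append, Bgo, ih]
      have hh : ((List.replicate k (-1) ++ Bgo t : List Int)).headD 0 = -1 := by
        cases k with
        | zero => simpa using ht
        | succ k => simp [List.replicate_succ]
      rw [if_pos ⟨hh, rfl⟩, List.replicate_succ, List.cons_append]

theorem Bgo_keep_run (k : Nat) (t : List Int) (ht : (Bgo t).headD 0 ≠ -1) :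
    Bgo (List.replicate k 1 ++ t) = List.replicate k 1 ++ Bgo t := by
  induction k with
  | zero => rfl
  | succ k ih =>
      rw [List.replicate_succ, List.cons_append, Bgo, ih]
      have hh : ((List.replicate k 1 ++ Bgo t : List Int)).headD 0 ≠ -1 := by
        cases k with
        | zero => simpa using ht
        | succ k => simp [List.replicate_succ]
      rw [if_neg (fun hc => hh hc.1)]
      simp

theorem takeWhile_one_eq_replicate (l : List Int) :
    l.takeWhile (fun y => y = 1)
      = List.replicate (l.takeWhile (fun y => y = 1)).length 1 := by
  induction l with
  | nil => rfl
  | cons x xs ih =>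
      by_cases hx : x = 1
      · simp [hx, List.replicate_succ, ← ih]
      · simp [hx]

theorem dropWhile_head_ne_one (l : List Int) :
    (l.dropWhile (fun y => y = 1)).headD 0 ≠ 1 ∨ l.dropWhile (fun y => y = 1) = [] := by
  induction l with
  | nil => right; rfl
  | cons x xs ih =>
      by_cases hx : x = 1
      · simpa [hx] using ih
      · left; simp [hx]

theorem goB_head (c : Int) (l : List Int) (h : l.headD 0 ≠ 1 ∨ l = []) :
    (goB c l).headD 0 = l.headD 0 := by
  cases l with
  | nil => rw [goB]
  | cons x xs =>
      have hx : x ≠ 1 := by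
        cases h with
        | inl h => simpa using h
        | inr h => simp at h
      rw [goB]
      simp [hx]

-- main semantic lemma: A's two passes equal B's run scan
theorem main_lemma : ∀ n l p, List.length l ≤ n → Bgo (Fgo p l) = goB p l := by
  intro n
  induction n with
  | zero =>
      intro l p h
      have : l = [] := List.eq_nil_of_length_eq_zero (Nat.le_zero.mp h)
      subst this
      rw [goB]
      simp [Fgo, Bgo]
  | succ n ih =>
      intro l p h
      cases l with
      | nil => rw [goB]; simp [Fgo, Bgo]
      | cons x xs =>
          by_cases hx : x = 1
          · subst hx
            -- split off the maximal run of 1s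
            set run := (1 :: xs).takeWhile (fun y => y = 1) with hrun
            set rest := (1 :: xs).dropWhile (fun y => y = 1) with hrest
            have hsplit : (1 :: xs : List Int) = run ++ rest :=
              (List.takeWhile_append_dropWhile).symm
            have hrep : run = List.replicate run.length 1 := takeWhile_one_eq_replicate _
            have hk : 0 < run.length := by
              simp [hrun]
            have hrestlen : rest.length ≤ n := by
              have h1 := congrArg List.length hsplit
              simp only [List.length_append, List.length_cons] at h1
              have h2 : xs.length + 1 ≤ n + 1 := by simpa using h
              omega
            have hrh := dropWhile_head_ne_one (1 :: xs)
            rw [← hrest] at hrh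
            -- B's side
            rw [goB]
            simp only [← hrun, ← hrest, if_true]
            by_cases hburn : p = -1 ∨ rest.headD 0 = -1
            · rw [if_pos hburn, if_pos hburn]
              have hmap : run.map (fun _ => (-1 : Int)) = List.replicate run.length (-1) := by
                simp
              -- A's side by cases on which neighbour burns
              have hgoal : Bgo (Fgo p (1 :: xs)) = List.replicate run.length (-1) ++ goB (-1) rest := by
                rcases hburn with hp | hr
                · -- left neighbour is -1: forward pass burns the run
                  subst hp
                  rw [hsplit, hrep, Fgo_burn_run]
                  have hFrest : Fgo (-1) rest = Fgo 0 rest := Fgo_prev_irrel rest _ _ hrh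
                  rw [hFrest]
                  have hBpref : Bgo (List.replicate run.length (-1) ++ Fgo 0 rest)
                      = List.replicate run.length (-1) ++ Bgo (Fgo 0 rest) := by
                    clear hsplit hrep hk
                    induction run.length with
                    | zero => rfl
                    | succ k ihh =>
                        rw [List.replicate_succ, List.cons_append,
                          Bgo_head_ne_one _ _ (by norm_num), ihh]
                        rfl
                  rw [hBpref, ih rest 0 hrestlen, goB_prev_irrel rest (-1) 0 hrh]
                  simp
                · -- right neighbour is -1: backward pass burns the run
                  by_cases hp : p = -1
                  · subst hp
                    rw [hsplit, hrep, Fgo_burn_run]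
                    have hFrest : Fgo (-1) rest = Fgo 0 rest := Fgo_prev_irrel rest _ _ hrh
                    rw [hFrest]
                    have hBpref : Bgo (List.replicate run.length (-1) ++ Fgo 0 rest)
                        = List.replicate run.length (-1) ++ Bgo (Fgo 0 rest) := by
                      clear hsplit hrep hk
                      induction run.length with
                      | zero => rfl
                      | succ k ihh =>
                          rw [List.replicate_succ, List.cons_append,
                            Bgo_head_ne_one _ _ (by norm_num), ihh]
                          rfl
                    rw [hBpref, ih rest 0 hrestlen, goB_prev_irrel rest (-1) 0 hrh]
                    simp
                  · rw [hsplit, hrep, Fgo_keep_run _ _ _ hp]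
                    have hk0 : ¬ run.length = 0 := by omega
                    rw [if_neg hk0]
                    have hFrest : Fgo 1 rest = Fgo 0 rest := Fgo_prev_irrel rest _ _ hrh
                    rw [hFrest]
                    have hhead : (Bgo (Fgo 0 rest)).headD 0 = -1 := by
                      rw [ih rest 0 hrestlen, goB_head 0 rest hrh, hr]
                    rw [Bgo_burn_run _ _ hhead, ih rest 0 hrestlen,
                      goB_prev_irrel rest (-1) 0 hrh]
                    simp
              rw [hgoal, hmap]
            · rw [if_neg hburn, if_neg hburn]
              obtain ⟨hp, hr⟩ := not_or.mp hburn
              rw [hsplit, hrep, Fgo_keep_run _ _ _ hp]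
              have hk0 : ¬ run.length = 0 := by omega
              rw [if_neg hk0]
              have hFrest : Fgo 1 rest = Fgo 0 rest := Fgo_prev_irrel rest _ _ hrh
              rw [hFrest]
              have hhead : (Bgo (Fgo 0 rest)).headD 0 ≠ -1 := by
                rw [ih rest 0 hrestlen, goB_head 0 rest hrh]
                exact hr
              rw [Bgo_keep_run _ _ hhead, ih rest 0 hrestlen,
                goB_prev_irrel rest 1 0 hrh, ← hrep]
          · -- head is not 1: both sides keep it and recurse
            have hF : Fgo p (x :: xs) = x :: Fgo x xs := by simp [Fgo, hx]
            rw [hF, Bgo]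
            have hlen : xs.length ≤ n := by simpa using Nat.succ_le_succ_iff.mp h
            rw [goB]
            simp only [if_neg hx]
            rw [ih xs x hlen]
            have hh : (Fgo x xs).headD 0 = -1 ∧ x = 1 ↔ False := by
              simp [hx]
            simp [hx]

-- ===== VERDICT (by name: the statement is the Claim_ definition above) =====
theorem propagacion_spec : Claim_equal_propagacion := by
  intro bosque _
  show propagacion bosque = propagacion_alt bosque
  unfold propagacion propagacion_alt
  rw [fwdAll_eq_Fgo, bwd_eq_Bgo]
  exact main_lemma bosque.length bosque 0 le_rfl
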